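-- pv_equiv track=rewrite | github.com/deadPix3l/wordVomit | main.py | find_word_chains
-- ===== SOURCE A (Python) =====
-- def find_word_chains(wordlist):
--     wordlist = sorted(wordlist, key=len)  # Sort words by length
--     chains = {}
--
--     def is_extension(base_word, new_word):
--         return new_word.startswith(base_word) and len(new_word) > len(base_word)
--
--     for word in wordlist:
--         for other_word in wordlist:
--             if is_extension(word, other_word):
--                 if word not in chains:
--                     chains[word] = []
--                 chains[word].append(other_word)
--
--     return chains
-- ===== SOURCE B (Python) =====
-- def find_word_chains(wordlist):
--     # One pass over a prefix index instead of the all-pairs scan: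
--     # each word registers itself under every proper prefix that is itself a word.
--     sw = sorted(wordlist, key=len)
--     count = {}
--     for w in sw:
--         count[w] = count.get(w, 0) + 1
--     ext = {}
--     for other in sw:
--         for l in range(len(other)):
--             p = other[:l]
--             if p in count:
--                 if p in ext:
--                     ext[p].append(other)
--                 else:
--                     ext[p] = [other]
--     chains = {}
--     for w in sw:
--         if w in ext and w not in chains:
--             chains[w] = ext[w] * count[w]
--     return chains
-- ===== Notes on version B (the rewrite author's own statement) =====
-- stated objective: faster
-- what changed: A compares every word against every other word (all-pairs startswith scan building the dict by repeated appends); B builds a word-count dict and a prefix index in one pass - each word registers itself under each of its proper prefixes that is itself a word - then emits each first-occurrence key once with its extension list repeated by its multiplicity.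
import Mathlib
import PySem

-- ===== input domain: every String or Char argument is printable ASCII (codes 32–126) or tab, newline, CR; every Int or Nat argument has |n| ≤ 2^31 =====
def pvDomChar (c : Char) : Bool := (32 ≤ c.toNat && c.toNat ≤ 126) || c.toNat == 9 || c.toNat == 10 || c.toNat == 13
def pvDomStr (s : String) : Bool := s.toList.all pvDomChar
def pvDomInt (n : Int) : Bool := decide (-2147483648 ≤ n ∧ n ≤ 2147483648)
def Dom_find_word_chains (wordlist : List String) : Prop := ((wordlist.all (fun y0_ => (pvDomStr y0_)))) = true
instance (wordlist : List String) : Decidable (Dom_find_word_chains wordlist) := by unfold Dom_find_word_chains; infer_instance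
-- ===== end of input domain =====

-- B replaces A's all-pairs scan by a prefix index: each word registers itself under every
-- proper prefix that is itself a word (objective: faster for many words).

-- ===== PORT A =====
def is_extension (base_word new_word : String) : Bool :=
  PySem.Str.startswith new_word base_word && decide (PySem.Str.len base_word < PySem.Str.len new_word)

def find_word_chains (wordlist : List String) : List (String × List String) :=
  let wordlist := PySem.List.sorted wordlist (fun w => PySem.Str.len w) false
  let chains : PySem.Dict String (List String) :=
    wordlist.foldl (fun chains word =>
      wordlist.foldl (fun chains other_word =>
        if is_extension word other_word then
          let chains := if chains.contains word then chains else chains.insert word []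
          chains.modify word [] (fun l => l ++ [other_word])
        else chains) chains) PySem.Dict.empty
  chains.items

-- ===== PORT B =====
def find_word_chains_alt (wordlist : List String) : List (String × List String) :=
  let sw := PySem.List.sorted wordlist (fun w => PySem.Str.len w) false
  let count : PySem.Dict String Int :=
    sw.foldl (fun d w => d.insert w (d.getD w 0 + 1)) PySem.Dict.empty
  let ext : PySem.Dict String (List String) :=
    sw.foldl (fun ext other =>
      (PySem.List.pyRange 0 (PySem.Str.len other) 1).foldl (fun ext l =>
        let p := PySem.Str.slice other none (some l)
        if count.contains p then
          if ext.contains p then ext.modify p [] (fun v => v ++ [other])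
          else ext.insert p [other]
        else ext) ext) PySem.Dict.empty
  let chains : PySem.Dict String (List String) :=
    sw.foldl (fun chains w =>
      if ext.contains w && !(chains.contains w) then
        chains.insert w (PySem.List.pyRepeat (ext.getD w []) (count.getD w 0))
      else chains) PySem.Dict.empty
  chains.items

-- ===== PRECONDITION & SPEC =====
def Spec_find_word_chains (wordlist : List String) (out : List (String × List String)) : Prop := out = find_word_chains_alt wordlist
instance (wordlist : List String) (out : List (String × List String)) : Decidable (Spec_find_word_chains wordlist out) := by unfold Spec_find_word_chains; infer_instance

-- ===== CLAIM (what is proved, stated in full; the proofs are below) =====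
def Claim_equal_find_word_chains : Prop := ∀ (wordlist : List String), Dom_find_word_chains wordlist → Spec_find_word_chains wordlist (find_word_chains wordlist)

-- ===== LEMMAS AND PROOFS =====

theorem dict_insert_insert {ν : Type} (d : PySem.Dict String ν) (k : String) (v v' : ν) :
    (d.insert k v).insert k v' = d.insert k v' := by
  apply PySem.Dict.ext
  by_cases h : d.contains k = true
  · rw [PySem.Dict.items_insert_of_contains _ _ (PySem.Dict.contains_insert_self d k v),
        PySem.Dict.items_insert_of_contains _ _ h, PySem.Dict.items_insert_of_contains _ _ h,
        List.map_map]
    apply List.map_congr_left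
    intro p _
    by_cases hp : p.1 = k <;> simp [hp]
  · have h' : d.contains k = false := by simpa using h
    have hall : ∀ p ∈ d.items, (p.1 == k) = false := by
      intro p hp
      by_contra hc
      have : d.contains k = true := by
        simp only [PySem.Dict.contains, List.any_eq_true]
        exact ⟨p, hp, by simpa using hc⟩
      simp [this] at h'
    rw [PySem.Dict.items_insert_of_contains _ _ (PySem.Dict.contains_insert_self d k v),
        PySem.Dict.items_insert_of_not_contains _ _ h', PySem.Dict.items_insert_of_not_contains _ _ h',
        List.map_append]
    congr 1
    · conv_rhs => rw [← List.map_id d.items]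
      apply List.map_congr_left
      intro p hp
      simp [hall p hp]
    · simp

theorem dict_modify_modify {ν : Type} (d : PySem.Dict String ν) (k : String)
    (d0 : ν) (f g : ν → ν) :
    (d.modify k d0 f).modify k d0 g = d.modify k d0 (fun v => g (f v)) := by
  simp only [PySem.Dict.modify, PySem.Dict.getD_insert_self]
  exact dict_insert_insert _ _ _ _

theorem ensure_modify (d : PySem.Dict String (List String)) (k : String)
    (f : List String → List String) :
    (if d.contains k then d else d.insert k []).modify k [] f = d.modify k [] f := by
  by_cases h : d.contains k = true
  · simp [h]
  · have h' : d.contains k = false := by simpa using h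
    rw [if_neg (by simp [h'])]
    simp only [PySem.Dict.modify, PySem.Dict.getD_insert_self,
      PySem.Dict.getD_of_not_contains _ _ h']
    exact dict_insert_insert _ _ _ _

theorem setdefault_modify (d : PySem.Dict String (List String)) (k : String) (o : String) :
    (if d.contains k then d.modify k [] (fun v => v ++ [o]) else d.insert k [o])
      = d.modify k [] (fun v => v ++ [o]) := by
  by_cases h : d.contains k = true
  · simp [h]
  · have h' : d.contains k = false := by simpa using h
    simp [h', PySem.Dict.modify, PySem.Dict.getD_of_not_contains _ _ h']

theorem fold_modify (k : String) :
    ∀ (l : List String) (d : PySem.Dict String (List String)), l ≠ [] →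
    l.foldl (fun c o => c.modify k [] (fun v => v ++ [o])) d = d.modify k [] (fun v => v ++ l) := by
  intro l
  induction l with
  | nil => intro d h; simp at h
  | cons x xs ih =>
    intro d _
    by_cases hxs : xs = []
    · simp [hxs]
    · simp only [List.foldl_cons, ih _ hxs, dict_modify_modify]
      congr 1
      funext v
      simp

def extOf (sw : List String) (w : String) : List String := sw.filter (fun o => is_extension w o)

theorem innerA (sw : List String) (w : String) (d : PySem.Dict String (List String)) :
    sw.foldl (fun chains other_word =>
        if is_extension w other_word then
          (if chains.contains w then chains else chains.insert w []).modify w []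
            (fun l => l ++ [other_word])
        else chains) d
      = if extOf sw w = [] then d else d.modify w [] (fun v => v ++ extOf sw w) := by
  have h1 : sw.foldl (fun chains other_word =>
        if is_extension w other_word then
          (if chains.contains w then chains else chains.insert w []).modify w []
            (fun l => l ++ [other_word])
        else chains) d
      = sw.foldl (fun chains other_word =>
        if is_extension w other_word then
          chains.modify w [] (fun l => l ++ [other_word])
        else chains) d := by
    apply PySem.List.foldl_congr_mem
    intro acc x _
    by_cases hx : is_extension w x = true
    · simp only [hx, if_true, ensure_modify]
    · simp [hx]
  rw [h1, PySem.List.foldl_if_eq_foldl_filter]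
  by_cases he : extOf sw w = []
  · rw [if_pos he]
    have h2 : sw.filter (is_extension w) = [] := by simpa [extOf] using he
    simp [h2]
  · rw [if_neg he]
    have h2 : sw.filter (is_extension w) ≠ [] := by simpa [extOf] using he
    rw [fold_modify w _ d h2]
    rfl

theorem discard_filter (s : List String) (x : String) (p : String → Bool) (hx : p x = false) :
    ((PySem.Set.discard s x).filter p) = s.filter p := by
  simp only [PySem.Set.discard, List.filter_filter]
  apply List.filter_congr
  intro y _
  by_cases hy : y = x
  · simp [hy, hx]
  · simp [hy]

theorem items_modify_of_contains (d : PySem.Dict String (List String)) (k : String)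
    (f : List String → List String) (hc : d.contains k = true) (hnd : d.keys.Nodup) :
    (d.modify k [] f).items = d.items.map (fun p => if p.1 == k then (k, f p.2) else p) := by
  simp only [PySem.Dict.modify]
  rw [PySem.Dict.items_insert_of_contains _ _ hc]
  apply List.map_congr_left
  intro p hp
  by_cases h : p.1 = k
  · have : d.getD k [] = p.2 := by
      apply PySem.Dict.getD_of_mem_items _ _ hnd
      rw [← h]; exact hp
    simp [h, this]
  · simp [h]

def stepA (sw : List String) (d : PySem.Dict String (List String)) (w : String) :
    PySem.Dict String (List String) :=
  if extOf sw w = [] then d else d.modify w [] (fun v => v ++ extOf sw w)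

def newKeys (sw xs : List String) (d : PySem.Dict String (List String)) : List String :=
  (PySem.Set.ofList (xs.filter (fun w => !(extOf sw w).isEmpty))).filter (fun k => !(d.contains k))

theorem foldA_items (sw : List String) :
    ∀ (xs : List String) (d : PySem.Dict String (List String)), d.keys.Nodup →
    (xs.foldl (stepA sw) d).items
      = d.items.map (fun p => (p.1, p.2 ++ (List.replicate (xs.count p.1) (extOf sw p.1)).flatten))
        ++ (newKeys sw xs d).map (fun k => (k, (List.replicate (xs.count k) (extOf sw k)).flatten)) := by
  intro xs
  induction xs with
  | nil =>
    intro d hd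
    simp [newKeys]
  | cons x xs ih =>
    intro d hd
    by_cases hx : extOf sw x = []
    · -- step does nothing, and x contributes nothing
      have hstep : stepA sw d x = d := by simp [stepA, hx]
      rw [List.foldl_cons, hstep, ih d hd]
      congr 1
      · apply List.map_congr_left
        intro p _
        by_cases hp : p.1 = x
        · simp [hp, hx, List.count_cons]
        · have : ((x :: xs).count p.1) = xs.count p.1 := by
            simp [List.count_cons, hp, Ne.symm hp]
          rw [this]
      · have : (x :: xs).filter (fun w => !(extOf sw w).isEmpty)
            = xs.filter (fun w => !(extOf sw w).isEmpty) := by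
          simp [List.filter_cons, hx]
        simp only [newKeys, this]
        apply List.map_congr_left
        intro kk hk
        have hkk : kk ∈ xs.filter (fun w => !(extOf sw w).isEmpty) := by
          have := List.mem_filter.mp hk  -- kk ∈ ofList (filter) and !contains
          exact (PySem.Set.mem_ofList _ _).mp this.1
        have hkx : kk ≠ x := by
          intro h
          have := (List.mem_filter.mp hkk).2
          rw [h] at this
          simp [hx] at this
        simp [List.count_cons, hkx, Ne.symm hkx]
    · by_cases hc : d.contains x = true
      · -- modify existing key
        have hstep : stepA sw d x = d.modify x [] (fun v => v ++ extOf sw x) := by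
          simp [stepA, hx]
        have hnd' : (d.modify x [] (fun v => v ++ extOf sw x)).keys.Nodup := by
          rw [PySem.Dict.keys_modify]
          exact PySem.Dict.nodup_keys_insert _ _ _ hd
        rw [List.foldl_cons, hstep, ih _ hnd',
          items_modify_of_contains _ _ _ hc hd, List.map_map]
        congr 1
        · apply List.map_congr_left
          intro p _
          by_cases hp : p.1 = x
          · simp only [Function.comp_apply, hp, beq_self_eq_true, if_true]
            have : ((x :: xs).count x) = xs.count x + 1 := by simp [List.count_cons]
            simp [hp, this, List.replicate_succ]
          · have hb : (p.1 == x) = false := by simpa using hp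
            simp only [Function.comp_apply, hb, Bool.false_eq_true, if_false]
            have : ((x :: xs).count p.1) = xs.count p.1 := by simp [List.count_cons, hp, Ne.symm hp]
            rw [this]
        · -- newKeys unchanged: contains of modify = contains of d for the filter,
          -- and x is filtered out of the candidate list since it is already a key
          have hfil : (x :: xs).filter (fun w => !(extOf sw w).isEmpty)
              = x :: xs.filter (fun w => !(extOf sw w).isEmpty) := by
            simp [List.filter_cons, hx, List.isEmpty_iff]
          have hcont : ∀ kk, (d.modify x [] (fun v => v ++ extOf sw x)).contains kk
              = (kk == x || d.contains kk) := by
            intro kk; exact PySem.Dict.contains_modify d x kk [] _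
          have hnk : newKeys sw xs (d.modify x [] (fun v => v ++ extOf sw x))
              = newKeys sw (x :: xs) d := by
            simp only [newKeys, hfil, PySem.Set.ofList_cons]
            rw [List.filter_cons]
            have : (!(d.contains x)) = false := by simp [hc]
            simp only [this, Bool.false_eq_true, if_false]
            rw [discard_filter _ _ _ this]
            apply List.filter_congr
            intro kk _
            rw [hcont kk]
            by_cases hkx : kk = x
            · simp [hkx, hc]
            · simp [hkx]
          rw [hnk]
          apply List.map_congr_left
          intro kk hk
          have hkk : kk ∈ (x :: xs).filter (fun w => !(extOf sw w).isEmpty) := by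
            have := List.mem_filter.mp hk
            exact (PySem.Set.mem_ofList _ _).mp this.1
          have hkx : kk ≠ x := by
            intro h
            have := (List.mem_filter.mp hk).2
            rw [h] at this
            simp [hc] at this
          simp [List.count_cons, hkx, Ne.symm hkx]
      · -- fresh key: insert at the end
        have hc' : d.contains x = false := by simpa using hc
        have hstep : stepA sw d x = d.insert x (extOf sw x) := by
          simp [stepA, hx, PySem.Dict.modify, PySem.Dict.getD_of_not_contains _ _ hc']
        have hnd' : (d.insert x (extOf sw x)).keys.Nodup :=
          PySem.Dict.nodup_keys_insert _ _ _ hd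
        rw [List.foldl_cons, hstep, ih _ hnd',
          PySem.Dict.items_insert_of_not_contains _ _ hc', List.map_append]
        have hall : ∀ p ∈ d.items, p.1 ≠ x := by
          intro p hp h
          have : d.contains x = true := by
            simp only [PySem.Dict.contains, List.any_eq_true]
            exact ⟨p, hp, by simp [h]⟩
          simp [this] at hc'
        have hfil : (x :: xs).filter (fun w => !(extOf sw w).isEmpty)
            = x :: xs.filter (fun w => !(extOf sw w).isEmpty) := by
          simp [List.filter_cons, hx, List.isEmpty_iff]
        have hnk : newKeys sw (x :: xs) d
            = x :: newKeys sw xs (d.insert x (extOf sw x)) := by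
          simp only [newKeys, hfil, PySem.Set.ofList_cons]
          rw [List.filter_cons]
          have hx2 : (!(d.contains x)) = true := by simp [hc']
          simp only [hx2, if_true]
          congr 1
          simp only [PySem.Set.discard, List.filter_filter]
          apply List.filter_congr
          intro kk _
          rw [PySem.Dict.contains_insert]
          by_cases hkx : kk = x
          · simp [hkx]
          · simp [hkx, Bool.and_comm]
        rw [hnk]
        have e1 : d.items.map (fun p => (p.1, p.2 ++ (List.replicate ((x :: xs).count p.1) (extOf sw p.1)).flatten))
            = d.items.map (fun p => (p.1, p.2 ++ (List.replicate (xs.count p.1) (extOf sw p.1)).flatten)) := by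
          apply List.map_congr_left
          intro p hp
          rw [show ((x :: xs).count p.1) = xs.count p.1 from by
            simp [List.count_cons, Ne.symm (hall p hp)]]
        have e2 : (newKeys sw xs (d.insert x (extOf sw x))).map
              (fun k => (k, (List.replicate ((x :: xs).count k) (extOf sw k)).flatten))
            = (newKeys sw xs (d.insert x (extOf sw x))).map
              (fun k => (k, (List.replicate (xs.count k) (extOf sw k)).flatten)) := by
          apply List.map_congr_left
          intro kk hk
          have hkx : kk ≠ x := by
            intro h
            have := (List.mem_filter.mp hk).2
            rw [h] at this
            simp [PySem.Dict.contains_insert] at this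
          rw [show ((x :: xs).count kk) = xs.count kk from by simp [List.count_cons, Ne.symm hkx]]
        conv_rhs => rw [e1, List.map_cons, e2]
        have h1 : ((x :: xs).count x) = xs.count x + 1 := by simp
        rw [h1]
        simp [List.replicate_succ]

theorem foldB_items (cond : String → Bool) (V : String → List String) :
    ∀ (xs : List String) (d : PySem.Dict String (List String)),
    (xs.foldl (fun c w => if cond w && !(c.contains w) then c.insert w (V w) else c) d).items
      = d.items ++ ((PySem.Set.ofList (xs.filter cond)).filter (fun k => !(d.contains k))).map
          (fun k => (k, V k)) := by
  intro xs
  induction xs with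
  | nil => intro d; simp
  | cons x xs ih =>
    intro d
    by_cases hcx : cond x = true
    · by_cases hc : d.contains x = true
      · have hb : (cond x && !(d.contains x)) = false := by simp [hcx, hc]
        rw [List.foldl_cons]
        simp only [hb, Bool.false_eq_true, if_false]
        rw [ih d, List.filter_cons]
        simp only [hcx, if_true, PySem.Set.ofList_cons, List.filter_cons]
        have hfx : (!(d.contains x)) = false := by simp [hc]
        simp only [hfx, Bool.false_eq_true, if_false]
        rw [discard_filter _ _ _ hfx]
      · have hc' : d.contains x = false := by simpa using hc
        have hb : (cond x && !(d.contains x)) = true := by simp [hcx, hc']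
        rw [List.foldl_cons]
        simp only [hb, if_true]
        rw [ih (d.insert x (V x)), PySem.Dict.items_insert_of_not_contains _ _ hc',
          List.filter_cons]
        simp only [hcx, if_true, PySem.Set.ofList_cons, List.filter_cons]
        have hfx : (!(d.contains x)) = true := by simp [hc']
        simp only [hfx, if_true]
        have : ((PySem.Set.ofList (xs.filter cond)).discard x).filter (fun k => !(d.contains k))
            = (PySem.Set.ofList (xs.filter cond)).filter (fun k => !((d.insert x (V x)).contains k)) := by
          simp only [PySem.Set.discard, List.filter_filter]
          apply List.filter_congr
          intro kk _
          rw [PySem.Dict.contains_insert]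
          by_cases hkx : kk = x
          · simp [hkx]
          · simp [hkx, Bool.and_comm]
        rw [this]
        simp
    · have hcx' : cond x = false := by simpa using hcx
      have hb : (cond x && !(d.contains x)) = false := by simp [hcx']
      rw [List.foldl_cons]
      simp only [hb, Bool.false_eq_true, if_false]
      rw [ih d, List.filter_cons]
      simp [hcx']

def pstep (sw : List String) (o : String) (e : PySem.Dict String (List String)) (i : Nat) :
    PySem.Dict String (List String) :=
  let p := String.ofList (o.toList.take i)
  if (PySem.Dict.counter sw).contains p then e.modify p [] (fun v => v ++ [o]) else e

theorem Einner_aux_getD (sw : List String) (o w : String) (hw : w ∈ sw)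
    (d : PySem.Dict String (List String)) :
    ∀ (m : Nat), m ≤ o.toList.length →
    ((List.range m).foldl (pstep sw o) d).getD w []
      = d.getD w []
        ++ (if o.toList.take w.toList.length = w.toList ∧ w.toList.length < m then [o] else []) := by
  intro m
  induction m with
  | zero => intro _; simp
  | succ m ih =>
    intro hm
    have hm' : m ≤ o.toList.length := by omega
    rw [List.range_succ, List.foldl_append, List.foldl_cons, List.foldl_nil]
    by_cases h : o.toList.take m = w.toList
    · have hpm : String.ofList (o.toList.take m) = w := by
        rw [h, String.ofList_toList]
      have hlen : w.toList.length = m := by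
        rw [← h, List.length_take]; omega
      have hcw : (PySem.Dict.counter sw).contains w = true := by
        rw [PySem.Dict.contains_counter]
        simp [hw]
      simp only [pstep, hpm, hcw, if_true]
      rw [PySem.Dict.getD_modify_self, ih hm']
      have hnot : ¬ (o.toList.take w.toList.length = w.toList ∧ w.toList.length < m) := by
        omega
      rw [if_neg hnot, if_pos ⟨by rw [hlen, h], by omega⟩]
      simp
    · have hne : w ≠ String.ofList (o.toList.take m) := by
        intro heq
        exact h (by simpa using (congrArg String.toList heq).symm)
      have hstep : (pstep sw o ((List.range m).foldl (pstep sw o) d) m).getD w []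
          = ((List.range m).foldl (pstep sw o) d).getD w [] := by
        simp only [pstep]
        by_cases hc : (PySem.Dict.counter sw).contains (String.ofList (o.toList.take m)) = true
        · rw [if_pos hc, PySem.Dict.getD_modify_of_ne _ _ _ hne]
        · rw [if_neg hc]
      rw [hstep, ih hm']
      congr 1
      by_cases hcond : o.toList.take w.toList.length = w.toList ∧ w.toList.length < m
      · rw [if_pos hcond, if_pos ⟨hcond.1, by omega⟩]
      · rw [if_neg hcond]
        rw [if_neg ?_]
        intro ⟨h1, h2⟩
        by_cases hl : w.toList.length = m
        · exact h (by rw [← hl]; exact h1)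
        · exact hcond ⟨h1, by omega⟩

theorem Einner_aux_contains (sw : List String) (o w : String) (hw : w ∈ sw)
    (d : PySem.Dict String (List String)) :
    ∀ (m : Nat), m ≤ o.toList.length →
    ((List.range m).foldl (pstep sw o) d).contains w
      = (d.contains w
        || decide (o.toList.take w.toList.length = w.toList ∧ w.toList.length < m)) := by
  intro m
  induction m with
  | zero => intro _; simp
  | succ m ih =>
    intro hm
    have hm' : m ≤ o.toList.length := by omega
    rw [List.range_succ, List.foldl_append, List.foldl_cons, List.foldl_nil]
    by_cases h : o.toList.take m = w.toList
    · have hpm : String.ofList (o.toList.take m) = w := by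
        rw [h, String.ofList_toList]
      have hlen : w.toList.length = m := by
        rw [← h, List.length_take]; omega
      have hcw : (PySem.Dict.counter sw).contains w = true := by
        rw [PySem.Dict.contains_counter]
        simp [hw]
      simp only [pstep, hpm, hcw, if_true]
      rw [PySem.Dict.contains_modify]
      have hcnd : (o.toList.take w.toList.length = w.toList ∧ w.toList.length < m + 1) :=
        ⟨by rw [hlen, h], by omega⟩
      simp only [beq_self_eq_true, Bool.true_or, decide_eq_true hcnd, Bool.or_true]
    · have hne : w ≠ String.ofList (o.toList.take m) := by
        intro heq
        exact h (by simpa using (congrArg String.toList heq).symm)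
      have hstep : (pstep sw o ((List.range m).foldl (pstep sw o) d) m).contains w
          = ((List.range m).foldl (pstep sw o) d).contains w := by
        simp only [pstep]
        by_cases hc : (PySem.Dict.counter sw).contains (String.ofList (o.toList.take m)) = true
        · rw [if_pos hc, PySem.Dict.contains_modify]
          simp [hne]
        · rw [if_neg hc]
      rw [hstep, ih hm']
      congr 1
      by_cases hcond : o.toList.take w.toList.length = w.toList ∧ w.toList.length < m
      · rw [decide_eq_true hcond, decide_eq_true (⟨hcond.1, by omega⟩ :
          o.toList.take w.toList.length = w.toList ∧ w.toList.length < m + 1)]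
      · have hcond' : ¬ (o.toList.take w.toList.length = w.toList ∧ w.toList.length < m + 1) := by
          intro hx2
          obtain ⟨h1, h2⟩ := hx2
          by_cases hl : w.toList.length = m
          · exact h (by rw [← hl]; exact h1)
          · exact hcond ⟨h1, by omega⟩
        rw [decide_eq_false hcond, decide_eq_false hcond']

theorem inner_port_eq (sw : List String) (o : String)
    (d : PySem.Dict String (List String)) :
    (PySem.List.pyRange 0 (PySem.Str.len o) 1).foldl (fun ext l =>
        let p := PySem.Str.slice o none (some l)
        if (PySem.Dict.counter sw).contains p then
          if ext.contains p then ext.modify p [] (fun v => v ++ [o])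
          else ext.insert p [o]
        else ext) d
      = (List.range o.toList.length).foldl (pstep sw o) d := by
  have hlen : PySem.Str.len o = ((o.toList.length : Nat) : Int) := by
    simp [PySem.Str.len]
  rw [hlen, PySem.List.pyRange_zero_nat, List.foldl_map]
  apply PySem.List.foldl_congr_mem
  intro acc i _
  have hp : PySem.Str.slice o none (some (i : Int)) = String.ofList (o.toList.take i) := by
    simp only [PySem.Str.slice, PySem.Chars.slice_eq_listSlice, PySem.List.slice_to_natCast]
  simp only [hp, pstep, setdefault_modify]

theorem cond_iff (w o : String) :
    (o.toList.take w.toList.length = w.toList ∧ w.toList.length < o.toList.length)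
      ↔ is_extension w o = true := by
  simp only [is_extension, Bool.and_eq_true, decide_eq_true_eq, PySem.Str.startswith,
    PySem.Chars.startswith_iff, PySem.Str.len]
  constructor
  · intro ⟨h1, h2⟩
    refine ⟨?_, by exact_mod_cast h2⟩
    exact (List.prefix_iff_eq_take.mpr h1.symm)
  · intro ⟨h1, h2⟩
    exact ⟨(List.prefix_iff_eq_take.mp h1).symm, by exact_mod_cast h2⟩

theorem extD_getD_aux (sw : List String) (w : String) (hw : w ∈ sw) :
    ∀ (xs : List String) (d : PySem.Dict String (List String)),
    (xs.foldl (fun e o => (List.range o.toList.length).foldl (pstep sw o) e) d).getD w []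
      = d.getD w [] ++ xs.filter (fun o => is_extension w o) := by
  intro xs
  induction xs with
  | nil => intro d; simp
  | cons x xs ih =>
    intro d
    rw [List.foldl_cons, ih, Einner_aux_getD sw x w hw d _ (le_refl _), List.filter_cons,
      List.append_assoc]
    congr 1
    by_cases hcond : x.toList.take w.toList.length = w.toList ∧ w.toList.length < x.toList.length
    · rw [if_pos hcond, if_pos ((cond_iff w x).mp hcond)]
      simp
    · rw [if_neg hcond, if_neg (by
        intro hb
        exact hcond ((cond_iff w x).mpr hb))]
      simp

theorem extD_contains_aux (sw : List String) (w : String) (hw : w ∈ sw) :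
    ∀ (xs : List String) (d : PySem.Dict String (List String)),
    (xs.foldl (fun e o => (List.range o.toList.length).foldl (pstep sw o) e) d).contains w
      = (d.contains w || xs.any (fun o => is_extension w o)) := by
  intro xs
  induction xs with
  | nil => intro d; simp
  | cons x xs ih =>
    intro d
    rw [List.foldl_cons, ih, Einner_aux_contains sw x w hw d _ (le_refl _), List.any_cons]
    by_cases hcond : x.toList.take w.toList.length = w.toList ∧ w.toList.length < x.toList.length
    · rw [decide_eq_true hcond, (cond_iff w x).mp hcond]
      simp
    · rw [decide_eq_false hcond]
      have : is_extension w x = false := by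
        by_contra hb
        exact hcond ((cond_iff w x).mpr (by simpa using hb))
      rw [this]
      simp

theorem any_eq_not_isEmpty_filter {α : Type} (l : List α) (p : α → Bool) :
    l.any p = !(l.filter p).isEmpty := by
  induction l with
  | nil => simp
  | cons x xs ih => by_cases h : p x = true <;> simp [List.filter_cons, h, ih]

theorem chains_eq (sw : List String) :
    (sw.foldl (fun chains word =>
        sw.foldl (fun chains other_word =>
          if is_extension word other_word then
            (if chains.contains word then chains else chains.insert word []).modify word []
              (fun l => l ++ [other_word])
          else chains) chains) PySem.Dict.empty).items
      = (sw.foldl (fun chains w =>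
           if (sw.foldl (fun ext other =>
             (PySem.List.pyRange 0 (PySem.Str.len other) 1).foldl (fun ext l =>
               if (sw.foldl (fun d w => d.insert w (d.getD w 0 + 1)) (PySem.Dict.empty (κ := String) (ν := Int))).contains (PySem.Str.slice other none (some l)) then
                 if ext.contains (PySem.Str.slice other none (some l)) then
                   ext.modify (PySem.Str.slice other none (some l)) [] (fun v => v ++ [other])
                 else ext.insert (PySem.Str.slice other none (some l)) [other]
               else ext) ext) (PySem.Dict.empty (κ := String) (ν := List String))).contains w && !(chains.contains w) then
             chains.insert w (PySem.List.pyRepeat ((sw.foldl (fun ext other =>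
             (PySem.List.pyRange 0 (PySem.Str.len other) 1).foldl (fun ext l =>
               if (sw.foldl (fun d w => d.insert w (d.getD w 0 + 1)) (PySem.Dict.empty (κ := String) (ν := Int))).contains (PySem.Str.slice other none (some l)) then
                 if ext.contains (PySem.Str.slice other none (some l)) then
                   ext.modify (PySem.Str.slice other none (some l)) [] (fun v => v ++ [other])
                 else ext.insert (PySem.Str.slice other none (some l)) [other]
               else ext) ext) (PySem.Dict.empty (κ := String) (ν := List String))).getD w []) ((sw.foldl (fun d w => d.insert w (d.getD w 0 + 1)) (PySem.Dict.empty (κ := String) (ν := Int))).getD w 0))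
           else chains) (PySem.Dict.empty (κ := String) (ν := List String))).items := by
  have hA : (sw.foldl (fun chains word =>
        sw.foldl (fun chains other_word =>
          if is_extension word other_word then
            (if chains.contains word then chains else chains.insert word []).modify word []
              (fun l => l ++ [other_word])
          else chains) chains) PySem.Dict.empty)
      = sw.foldl (stepA sw) PySem.Dict.empty := by
    apply PySem.List.foldl_congr_mem
    intro acc w _
    exact innerA sw w acc
  rw [hA, foldA_items sw sw _ PySem.Dict.nodup_keys_empty]
  rw [PySem.Dict.foldl_insert_getD_add_one_eq_counter sw]
  have hE : (sw.foldl (fun ext other =>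
             (PySem.List.pyRange 0 (PySem.Str.len other) 1).foldl (fun ext l =>
               if (PySem.Dict.counter sw).contains (PySem.Str.slice other none (some l)) then
                 if ext.contains (PySem.Str.slice other none (some l)) then
                   ext.modify (PySem.Str.slice other none (some l)) [] (fun v => v ++ [other])
                 else ext.insert (PySem.Str.slice other none (some l)) [other]
               else ext) ext) PySem.Dict.empty)
      = sw.foldl (fun e o => (List.range o.toList.length).foldl (pstep sw o) e)
          PySem.Dict.empty := by
    apply PySem.List.foldl_congr_mem
    intro acc o _
    exact inner_port_eq sw o acc
  rw [hE]
  set E := sw.foldl (fun e o => (List.range o.toList.length).foldl (pstep sw o) e)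
      PySem.Dict.empty with hEdef
  rw [foldB_items (fun w => E.contains w)
    (fun w => PySem.List.pyRepeat (E.getD w []) ((PySem.Dict.counter sw).getD w 0)) sw
    PySem.Dict.empty]
  simp only [PySem.Dict.empty, List.map_nil, List.nil_append]
  have hfil : sw.filter (fun w => E.contains w)
      = sw.filter (fun w => !(extOf sw w).isEmpty) := by
    apply List.filter_congr
    intro w hw
    rw [hEdef, extD_contains_aux sw w hw sw PySem.Dict.empty, PySem.Dict.contains_empty,
      Bool.false_or, extOf, any_eq_not_isEmpty_filter]
  rw [newKeys, hfil]
  simp only [PySem.Dict.contains, List.any_nil, Bool.not_false, List.filter_true]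
  apply List.map_congr_left
  intro k hk
  have hks : k ∈ sw := by
    have h1 := (PySem.Set.mem_ofList _ _).mp hk
    exact (List.mem_filter.mp h1).1
  rw [hEdef, extD_getD_aux sw k hks sw PySem.Dict.empty, PySem.Dict.getD_empty,
    List.nil_append, PySem.Dict.getD_counter]
  have : PySem.List.pyRepeat (sw.filter (fun o => is_extension k o)) ((sw.count k : Nat) : Int)
      = (List.replicate (sw.count k) (extOf sw k)).flatten := by
    simp [PySem.List.pyRepeat, extOf]
  rw [this]


-- ===== VERDICT (by name: the statement is the Claim_ definition above) =====
theorem find_word_chains_spec : Claim_equal_find_word_chains := by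
  intro wordlist _
  show find_word_chains wordlist = find_word_chains_alt wordlist
  exact chains_eq (PySem.List.sorted wordlist (fun w => PySem.Str.len w) false)
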